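-- pv_equiv track=rewrite | github.com/terrene-foundation/kailash-py | packages/kailash-dataflow/tests/e2e/migrations/test_risk_assessment_workflows_e2e.py | _determine_overall_recommendation
-- ===== SOURCE A (Python) =====
-- from typing import Dict, List, Optional
--
-- def _determine_overall_recommendation(decisions: List[Dict]) -> str:
--     """Determine overall workflow recommendation based on individual decisions."""
--     actions = [d["action"] for d in decisions]
--
--     if "BLOCK" in actions:
--         return "BLOCK_WORKFLOW"
--     elif "REQUIRE_APPROVAL" in actions:
--         return "REQUIRE_MANAGEMENT_APPROVAL"
--     elif "PROCEED_WITH_CAUTION" in actions: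
--         return "PROCEED_WITH_ENHANCED_MONITORING"
--     elif "PROCEED_WITH_MONITORING" in actions:
--         return "PROCEED_WITH_STANDARD_MONITORING"
--     else:
--         return "PROCEED_SAFELY"
-- ===== SOURCE B (Python) =====
-- _RANKS = {
--     "BLOCK": 0,
--     "REQUIRE_APPROVAL": 1,
--     "PROCEED_WITH_CAUTION": 2,
--     "PROCEED_WITH_MONITORING": 3,
-- }
-- _RECS = [
--     "BLOCK_WORKFLOW",
--     "REQUIRE_MANAGEMENT_APPROVAL",
--     "PROCEED_WITH_ENHANCED_MONITORING",
--     "PROCEED_WITH_STANDARD_MONITORING",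
-- ]
--
-- def _determine_overall_recommendation(decisions):
--     """One pass tracking the minimum action rank instead of four membership scans."""
--     best = 4
--     for d in decisions:
--         r = _RANKS.get(d["action"], 4)
--         if r < best:
--             best = r
--     return _RECS[best] if best < 4 else "PROCEED_SAFELY"
-- ===== Notes on version B (the rewrite author's own statement) =====
-- stated objective: simpler
-- what changed: Replaces building an actions list plus four successive membership scans with a single pass that tracks the minimum priority rank of the actions seen, then indexes a rank-to-recommendation table.
import Mathlib
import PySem

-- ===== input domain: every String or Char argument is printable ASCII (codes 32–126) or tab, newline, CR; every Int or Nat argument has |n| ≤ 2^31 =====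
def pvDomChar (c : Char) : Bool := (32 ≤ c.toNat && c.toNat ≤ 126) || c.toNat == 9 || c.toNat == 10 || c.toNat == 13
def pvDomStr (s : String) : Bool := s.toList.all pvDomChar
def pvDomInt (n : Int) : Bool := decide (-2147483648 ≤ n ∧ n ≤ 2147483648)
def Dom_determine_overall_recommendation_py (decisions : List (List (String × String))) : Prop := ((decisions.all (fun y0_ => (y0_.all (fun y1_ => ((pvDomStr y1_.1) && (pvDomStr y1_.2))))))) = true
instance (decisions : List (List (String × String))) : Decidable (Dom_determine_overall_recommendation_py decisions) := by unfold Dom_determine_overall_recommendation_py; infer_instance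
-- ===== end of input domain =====

-- B replaces the actions list and four membership scans with one pass keeping the minimum
-- action rank, read off a rank-to-recommendation table (same result, simpler single pass).


-- ===== PORT A =====
-- d["action"]: first-match association-list lookup; the .getD "" default is never used
-- under Pre_ (which demands the key be present, exactly where Python does not raise KeyError).
def determine_overall_recommendation_py (decisions : List (List (String × String))) : String :=
  let actions := decisions.map (fun d => (List.lookup "action" d).getD "")
  if actions.contains "BLOCK" then "BLOCK_WORKFLOW"
  else if actions.contains "REQUIRE_APPROVAL" then "REQUIRE_MANAGEMENT_APPROVAL"
  else if actions.contains "PROCEED_WITH_CAUTION" then "PROCEED_WITH_ENHANCED_MONITORING"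
  else if actions.contains "PROCEED_WITH_MONITORING" then "PROCEED_WITH_STANDARD_MONITORING"
  else "PROCEED_SAFELY"

-- ===== PORT B =====
def pvRanks : List (String × Int) :=
  [("BLOCK", 0), ("REQUIRE_APPROVAL", 1), ("PROCEED_WITH_CAUTION", 2), ("PROCEED_WITH_MONITORING", 3)]
def pvRecs : List String :=
  ["BLOCK_WORKFLOW", "REQUIRE_MANAGEMENT_APPROVAL",
   "PROCEED_WITH_ENHANCED_MONITORING", "PROCEED_WITH_STANDARD_MONITORING"]
def determine_overall_recommendation_py_alt (decisions : List (List (String × String))) : String :=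
  let best := decisions.foldl (fun best d =>
      let r := (List.lookup ((List.lookup "action" d).getD "") pvRanks).getD 4
      if r < best then r else best) 4
  if best < 4 then PySem.List.pyGetD pvRecs best "" else "PROCEED_SAFELY"

-- ===== PRECONDITION & SPEC =====
-- Pre_ excludes inputs where some decision dict lacks the key "action": there the Python A raises KeyError.
def Pre_determine_overall_recommendation_py (decisions : List (List (String × String))) : Prop :=
  ∀ d ∈ decisions, (List.lookup "action" d).isSome
instance (decisions : List (List (String × String))) : Decidable (Pre_determine_overall_recommendation_py decisions) := by unfold Pre_determine_overall_recommendation_py; infer_instance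
def pvWitness_determine_overall_recommendation_py : (List (List (String × String))) :=
  [[("action", "BLOCK")], [("action", "PROCEED_WITH_CAUTION")]]

def Spec_determine_overall_recommendation_py (decisions : List (List (String × String))) (out : String) : Prop := out = determine_overall_recommendation_py_alt decisions
instance (decisions : List (List (String × String))) (out : String) : Decidable (Spec_determine_overall_recommendation_py decisions out) := by unfold Spec_determine_overall_recommendation_py; infer_instance

-- ===== CLAIM (what is proved, stated in full; the proofs are below) =====
def Claim_equal_determine_overall_recommendation_py : Prop := ∀ (decisions : List (List (String × String))), Dom_determine_overall_recommendation_py decisions → Pre_determine_overall_recommendation_py decisions → Spec_determine_overall_recommendation_py decisions (determine_overall_recommendation_py decisions)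

-- ===== LEMMAS AND PROOFS =====

-- the action string of one decision, and its rank in B's table
def pvAct (d : List (String × String)) : String := (List.lookup "action" d).getD ""
def pvRank (s : String) : Int := (List.lookup s pvRanks).getD 4

lemma pvRank_eq (s : String) : pvRank s =
    if s = "BLOCK" then 0 else if s = "REQUIRE_APPROVAL" then 1
    else if s = "PROCEED_WITH_CAUTION" then 2
    else if s = "PROCEED_WITH_MONITORING" then 3 else 4 := by
  simp only [pvRank, pvRanks, List.lookup]
  by_cases h1 : s = "BLOCK"
  · simp [h1]
  rw [beq_eq_false_iff_ne.mpr h1]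
  by_cases h2 : s = "REQUIRE_APPROVAL"
  · simp [h2]
  rw [beq_eq_false_iff_ne.mpr h2]
  by_cases h3 : s = "PROCEED_WITH_CAUTION"
  · simp [h3]
  rw [beq_eq_false_iff_ne.mpr h3]
  by_cases h4 : s = "PROCEED_WITH_MONITORING"
  · simp [h4]
  rw [beq_eq_false_iff_ne.mpr h4]
  simp [h1, h2, h3, h4]

lemma pvRank_bounds (s : String) : 0 ≤ pvRank s ∧ pvRank s ≤ 4 := by
  rw [pvRank_eq]; split_ifs <;> norm_num

-- recursive minimum rank
def pvG : List (List (String × String)) → Int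
  | [] => 4
  | d :: ds => min (pvRank (pvAct d)) (pvG ds)

lemma pvG_bounds (ds : List (List (String × String))) : 0 ≤ pvG ds ∧ pvG ds ≤ 4 := by
  induction ds with
  | nil => simp [pvG]
  | cons d ds ih =>
    have := pvRank_bounds (pvAct d)
    simp only [pvG]; omega

lemma pvFold_gen (f : Int → List (String × String) → Int)
    (hf : ∀ b d, f b d = min b (pvRank (pvAct d))) :
    ∀ (ds : List (List (String × String))) (b : Int), b ≤ 4 →
      List.foldl f b ds = min b (pvG ds) := by
  intro ds
  induction ds with
  | nil => intro b hb; simp only [List.foldl_nil, pvG]; omega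
  | cons d ds ih =>
    intro b hb
    have hr := pvRank_bounds (pvAct d)
    rw [List.foldl_cons, hf, ih _ (by omega)]
    simp only [pvG]; omega

lemma pvFold_eq (ds : List (List (String × String))) :
    ds.foldl (fun best d =>
      let r := (List.lookup ((List.lookup "action" d).getD "") pvRanks).getD 4
      if r < best then r else best) 4 = pvG ds := by
  rw [pvFold_gen _ (fun b d => by
        simp only [pvRank, pvAct]
        split_ifs <;> omega) ds 4 (by omega)]
  have := pvG_bounds ds
  omega

lemma pvG_le_iff (ds : List (List (String × String))) (k : Int) (hk : k ≤ 3) :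
    pvG ds ≤ k ↔ ∃ d ∈ ds, pvRank (pvAct d) ≤ k := by
  induction ds with
  | nil => simp [pvG]; omega
  | cons d ds ih =>
    simp only [pvG, min_le_iff, ih, List.mem_cons]
    constructor
    · rintro (h | ⟨d', hd', h⟩)
      · exact ⟨d, Or.inl rfl, h⟩
      · exact ⟨d', Or.inr hd', h⟩
    · rintro ⟨d', (rfl | hd'), h⟩
      · exact Or.inl h
      · exact Or.inr ⟨d', hd', h⟩

lemma pvRank_le_cases (s : String) (k : Int) (h0 : 0 ≤ k) (h3 : k ≤ 3) :
    pvRank s ≤ k ↔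
      (s = "BLOCK" ∧ 0 ≤ k) ∨ (s = "REQUIRE_APPROVAL" ∧ 1 ≤ k) ∨
      (s = "PROCEED_WITH_CAUTION" ∧ 2 ≤ k) ∨ (s = "PROCEED_WITH_MONITORING" ∧ 3 ≤ k) := by
  rw [pvRank_eq]; split_ifs <;> simp_all
  omega

-- ===== VERDICT (by name: the statement is the Claim_ definition above) =====
theorem determine_overall_recommendation_py_spec : Claim_equal_determine_overall_recommendation_py := by
  intro ds _ _
  unfold Spec_determine_overall_recommendation_py
  unfold determine_overall_recommendation_py determine_overall_recommendation_py_alt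
  simp only [pvFold_eq]
  obtain ⟨hgl, hgr⟩ := pvG_bounds ds
  have g0 : pvG ds ≤ 0 ↔ ∃ d ∈ ds, pvAct d = "BLOCK" := by
    rw [pvG_le_iff ds 0 (by omega)]
    constructor
    · rintro ⟨d, hd, hr⟩
      rw [pvRank_le_cases _ _ (by omega) (by omega)] at hr
      rcases hr with ⟨h, _⟩ | ⟨_, h⟩ | ⟨_, h⟩ | ⟨_, h⟩ <;> first | exact ⟨d, hd, h⟩ | omega
    · rintro ⟨d, hd, hs⟩
      exact ⟨d, hd, by rw [hs]; decide⟩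
  have g1 : pvG ds ≤ 1 ↔ ∃ d ∈ ds, (pvAct d = "BLOCK" ∨ pvAct d = "REQUIRE_APPROVAL") := by
    rw [pvG_le_iff ds 1 (by omega)]
    constructor
    · rintro ⟨d, hd, hr⟩
      rw [pvRank_le_cases _ _ (by omega) (by omega)] at hr
      rcases hr with ⟨h, _⟩ | ⟨h, _⟩ | ⟨_, h⟩ | ⟨_, h⟩ <;>
        first | exact ⟨d, hd, Or.inl h⟩ | exact ⟨d, hd, Or.inr h⟩ | omega
    · rintro ⟨d, hd, hs | hs⟩ <;> exact ⟨d, hd, by rw [hs]; decide⟩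
  have g2 : pvG ds ≤ 2 ↔ ∃ d ∈ ds, (pvAct d = "BLOCK" ∨ pvAct d = "REQUIRE_APPROVAL" ∨ pvAct d = "PROCEED_WITH_CAUTION") := by
    rw [pvG_le_iff ds 2 (by omega)]
    constructor
    · rintro ⟨d, hd, hr⟩
      rw [pvRank_le_cases _ _ (by omega) (by omega)] at hr
      rcases hr with ⟨h, _⟩ | ⟨h, _⟩ | ⟨h, _⟩ | ⟨_, h⟩ <;>
        first | exact ⟨d, hd, Or.inl h⟩ | exact ⟨d, hd, Or.inr (Or.inl h)⟩
              | exact ⟨d, hd, Or.inr (Or.inr h)⟩ | omega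
    · rintro ⟨d, hd, hs | hs | hs⟩ <;> exact ⟨d, hd, by rw [hs]; decide⟩
  have g3 : pvG ds ≤ 3 ↔ ∃ d ∈ ds, (pvAct d = "BLOCK" ∨ pvAct d = "REQUIRE_APPROVAL" ∨ pvAct d = "PROCEED_WITH_CAUTION" ∨ pvAct d = "PROCEED_WITH_MONITORING") := by
    rw [pvG_le_iff ds 3 (by omega)]
    constructor
    · rintro ⟨d, hd, hr⟩
      rw [pvRank_le_cases _ _ (by omega) (by omega)] at hr
      rcases hr with ⟨h, _⟩ | ⟨h, _⟩ | ⟨h, _⟩ | ⟨h, _⟩ <;>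
        first | exact ⟨d, hd, Or.inl h⟩ | exact ⟨d, hd, Or.inr (Or.inl h)⟩
              | exact ⟨d, hd, Or.inr (Or.inr (Or.inl h))⟩ | exact ⟨d, hd, Or.inr (Or.inr (Or.inr h))⟩
    · rintro ⟨d, hd, hs | hs | hs | hs⟩ <;> exact ⟨d, hd, by rw [hs]; decide⟩
  have hcases : pvG ds = 0 ∨ pvG ds = 1 ∨ pvG ds = 2 ∨ pvG ds = 3 ∨ pvG ds = 4 := by omega
  rcases hcases with h | h | h | h | h
  · -- pvG = 0 : BLOCK present
    obtain ⟨d, hd, hs⟩ := g0.mp (by omega)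
    simp only [pvAct] at hs
    have hB : ∃ a ∈ ds, (List.lookup "action" a).getD "" = "BLOCK" := ⟨d, hd, hs⟩
    simp [h, hB, PySem.List.pyGetD, pvRecs]
  · -- pvG = 1 : REQUIRE_APPROVAL present, BLOCK absent
    have nB : ∀ d ∈ ds, ¬ (List.lookup "action" d).getD "" = "BLOCK" := by
      intro d hd hs; have := g0.mpr ⟨d, hd, hs⟩; omega
    obtain ⟨d, hd, hs⟩ := g1.mp (by omega)
    simp only [pvAct] at hs
    rcases hs with hs | hs
    · exact absurd hs (nB d hd)
    · have hR : ∃ a ∈ ds, (List.lookup "action" a).getD "" = "REQUIRE_APPROVAL" := ⟨d, hd, hs⟩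
      simp [h, hR, PySem.List.pyGetD, pvRecs]
      exact nB
  · -- pvG = 2 : PROCEED_WITH_CAUTION present, higher priorities absent
    have nB : ∀ d ∈ ds, ¬ (List.lookup "action" d).getD "" = "BLOCK" := by
      intro d hd hs; have := g0.mpr ⟨d, hd, hs⟩; omega
    have nR : ∀ d ∈ ds, ¬ (List.lookup "action" d).getD "" = "REQUIRE_APPROVAL" := by
      intro d hd hs; have := g1.mpr ⟨d, hd, Or.inr hs⟩; omega
    obtain ⟨d, hd, hs⟩ := g2.mp (by omega)
    simp only [pvAct] at hs
    rcases hs with hs | hs | hs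
    · exact absurd hs (nB d hd)
    · exact absurd hs (nR d hd)
    · have hC : ∃ a ∈ ds, (List.lookup "action" a).getD "" = "PROCEED_WITH_CAUTION" := ⟨d, hd, hs⟩
      simp [h, hC, PySem.List.pyGetD, pvRecs]
      rw [if_neg (by rintro ⟨a, ha, hx⟩; exact nB a ha hx), if_neg (by rintro ⟨a, ha, hx⟩; exact nR a ha hx)]
  · -- pvG = 3 : PROCEED_WITH_MONITORING present, higher priorities absent
    have nB : ∀ d ∈ ds, ¬ (List.lookup "action" d).getD "" = "BLOCK" := by
      intro d hd hs; have := g0.mpr ⟨d, hd, hs⟩; omega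
    have nR : ∀ d ∈ ds, ¬ (List.lookup "action" d).getD "" = "REQUIRE_APPROVAL" := by
      intro d hd hs; have := g1.mpr ⟨d, hd, Or.inr hs⟩; omega
    have nC : ∀ d ∈ ds, ¬ (List.lookup "action" d).getD "" = "PROCEED_WITH_CAUTION" := by
      intro d hd hs; have := g2.mpr ⟨d, hd, Or.inr (Or.inr hs)⟩; omega
    obtain ⟨d, hd, hs⟩ := g3.mp (by omega)
    simp only [pvAct] at hs
    rcases hs with hs | hs | hs | hs
    · exact absurd hs (nB d hd)
    · exact absurd hs (nR d hd)
    · exact absurd hs (nC d hd)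
    · have hM : ∃ a ∈ ds, (List.lookup "action" a).getD "" = "PROCEED_WITH_MONITORING" := ⟨d, hd, hs⟩
      simp [h, hM, PySem.List.pyGetD, pvRecs]
      rw [if_neg (by rintro ⟨a, ha, hx⟩; exact nB a ha hx), if_neg (by rintro ⟨a, ha, hx⟩; exact nR a ha hx), if_neg (by rintro ⟨a, ha, hx⟩; exact nC a ha hx)]
  · -- pvG = 4 : none of the keywords present
    have nB : ∀ d ∈ ds, ¬ (List.lookup "action" d).getD "" = "BLOCK" := by
      intro d hd hs; have := g0.mpr ⟨d, hd, hs⟩; omega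
    have nR : ∀ d ∈ ds, ¬ (List.lookup "action" d).getD "" = "REQUIRE_APPROVAL" := by
      intro d hd hs; have := g1.mpr ⟨d, hd, Or.inr hs⟩; omega
    have nC : ∀ d ∈ ds, ¬ (List.lookup "action" d).getD "" = "PROCEED_WITH_CAUTION" := by
      intro d hd hs; have := g2.mpr ⟨d, hd, Or.inr (Or.inr hs)⟩; omega
    have nM : ∀ d ∈ ds, ¬ (List.lookup "action" d).getD "" = "PROCEED_WITH_MONITORING" := by
      intro d hd hs; have := g3.mpr ⟨d, hd, Or.inr (Or.inr (Or.inr hs))⟩; omega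
    simp [h]
    rw [if_neg (by rintro ⟨a, ha, hx⟩; exact nB a ha hx), if_neg (by rintro ⟨a, ha, hx⟩; exact nR a ha hx), if_neg (by rintro ⟨a, ha, hx⟩; exact nC a ha hx), if_neg (by rintro ⟨a, ha, hx⟩; exact nM a ha hx)]
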